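-- pv_equiv track=rewrite | github.com/ManishVerma16/CodeChef_Solution | chefAndGroups.py | chefAndGroups
-- ===== SOURCE A (Python) =====
-- def chefAndGroups(arr):
-- 	count = 0
-- 	for i in range(len(arr)-1):
-- 		if arr[i] != arr[i+1]:
-- 			count += 1
-- 	if arr[0] == '0' and arr[-1]=='0':
-- 		return count//2
-- 	else:
-- 		return (count//2) + 1
-- ===== SOURCE B (Python) =====
-- def chefAndGroups(arr):
--     # Stage 1: count maximal runs by skipping over each whole run (nested while),
--     # never comparing adjacent pairs one by one in a single flat pass.
--     runs = 0
--     i, n = 0, len(arr)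
--     while i < n:
--         runs += 1
--         head = arr[i]
--         while i < n and arr[i] == head:
--             i += 1
--     # Stage 2: closed-form answer, no branch: ceil(runs/2) minus 1 iff both ends are '0'.
--     return (runs + 1) // 2 - (arr[0] == '0' and arr[-1] == '0')
-- ===== Notes on version B (the rewrite author's own statement) =====
-- stated objective: alternative
-- what changed: B replaces A's flat index loop over adjacent pairs plus a two-way branch on count//2 by a two-stage algorithm: an outer loop that jumps run by run (inner while skips each maximal run) to count runs, then a branch-free closed form (runs+1)//2 minus the both-ends-'0' indicator.
import Mathlib
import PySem

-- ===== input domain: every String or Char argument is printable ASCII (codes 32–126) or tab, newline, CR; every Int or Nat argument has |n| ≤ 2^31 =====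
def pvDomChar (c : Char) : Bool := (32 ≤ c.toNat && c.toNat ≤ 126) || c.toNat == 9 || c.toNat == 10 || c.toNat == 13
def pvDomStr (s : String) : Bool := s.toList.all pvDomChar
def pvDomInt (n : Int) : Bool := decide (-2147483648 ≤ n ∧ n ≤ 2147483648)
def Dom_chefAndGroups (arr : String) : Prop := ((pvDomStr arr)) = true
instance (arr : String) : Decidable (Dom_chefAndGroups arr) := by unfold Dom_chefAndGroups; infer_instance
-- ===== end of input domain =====

-- B counts maximal runs by skipping run by run (nested loops) and returns the
-- closed form (runs+1)//2 minus the both-ends-'0' indicator, instead of A's flat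
-- adjacent-pair count with a two-way branch; objective: alternative.

-- ===== PORT A =====
-- Literal port of A: index loop over range(len(arr)-1) counting adjacent inequalities.
def chefAndGroups (arr : String) : Int :=
  let cs := arr.toList
  let count : Int := (PySem.List.pyRange 0 (PySem.List.len cs - 1) 1).foldl
    (fun c i => if PySem.List.pyGetD cs i ' ' ≠ PySem.List.pyGetD cs (i + 1) ' ' then c + 1 else c) 0
  if PySem.List.pyGetD cs 0 ' ' = '0' ∧ PySem.List.pyGetD cs (-1) ' ' = '0' then
    PySem.Int.floordiv count 2
  else
    PySem.Int.floordiv count 2 + 1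

-- ===== PORT B =====
-- B-side helpers: the inner `while i < n and arr[i] == head: i += 1`
-- (the unread prefix of the list plays the role of the index i).
def pvSkipRun (head : Char) : List Char → List Char
  | [] => []
  | c :: rest => if c = head then pvSkipRun head rest else c :: rest

lemma pvSkipRun_length_le (head : Char) (l : List Char) :
    (pvSkipRun head l).length ≤ l.length := by
  induction l with
  | nil => simp [pvSkipRun]
  | cons c rest ih =>
    simp only [pvSkipRun]
    split
    · exact Nat.le_succ_of_le ih
    · simp

-- the outer `while i < n: runs += 1; …skip the run…`
def pvRuns : List Char → Int
  | [] => 0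
  | c :: rest => 1 + pvRuns (pvSkipRun c rest)
termination_by l => l.length
decreasing_by
  exact Nat.lt_succ_of_le (pvSkipRun_length_le c rest)

-- Literal port of B: count runs by skipping each maximal run, then the
-- branch-free closed form (runs+1)//2 - (arr[0]=='0' and arr[-1]=='0').
def chefAndGroups_alt (arr : String) : Int :=
  let cs := arr.toList
  let runs := pvRuns cs
  PySem.Int.floordiv (runs + 1) 2 -
    (if PySem.List.pyGetD cs 0 ' ' = '0' ∧ PySem.List.pyGetD cs (-1) ' ' = '0' then 1 else 0)

-- ===== PRECONDITION & SPEC =====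
-- Pre_ excludes only the empty string, on which A (and B) raise IndexError at arr[0].
def Pre_chefAndGroups (arr : String) : Prop := arr.toList ≠ []
instance (arr : String) : Decidable (Pre_chefAndGroups arr) := by unfold Pre_chefAndGroups; infer_instance

def pvWitness_chefAndGroups : String := "0110"

def Spec_chefAndGroups (arr : String) (out : Int) : Prop := out = chefAndGroups_alt arr
instance (arr : String) (out : Int) : Decidable (Spec_chefAndGroups arr out) := by unfold Spec_chefAndGroups; infer_instance

-- ===== CLAIM (what is proved, stated in full; the proofs are below) =====
def Claim_equal_chefAndGroups : Prop := ∀ (arr : String), Dom_chefAndGroups arr → Pre_chefAndGroups arr → Spec_chefAndGroups arr (chefAndGroups arr)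

-- ===== LEMMAS AND PROOFS =====

-- number of adjacent unequal pairs, structurally
def pvTrans : List Char → Int
  | [] => 0
  | [_] => 0
  | a :: b :: rest => (if a ≠ b then 1 else 0) + pvTrans (b :: rest)

-- A's loop computes pvTrans
lemma pvShift (a : Char) (cs : List Char) (m : Nat) (acc : Int) :
    (PySem.List.pyRange 1 ((m : Int) + 1) 1).foldl
      (fun c i => if PySem.List.pyGetD (a :: cs) i ' ' ≠ PySem.List.pyGetD (a :: cs) (i + 1) ' ' then c + 1 else c) acc
    = (PySem.List.pyRange 0 (m : Int) 1).foldl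
      (fun c i => if PySem.List.pyGetD cs i ' ' ≠ PySem.List.pyGetD cs (i + 1) ' ' then c + 1 else c) acc := by
  rw [PySem.List.pyRange_one, PySem.List.pyRange_one]
  have h : ((m : Int) + 1 - 1).toNat = ((m : Int) - 0).toNat := by omega
  rw [h, List.foldl_map, List.foldl_map]
  apply PySem.List.foldl_congr_mem
  intro c k _
  have h1 : (1 : Int) + (k : Int) = ((k + 1 : Nat) : Int) := by push_cast; ring
  have h2 : ((k + 1 : Nat) : Int) + 1 = ((k + 2 : Nat) : Int) := by push_cast; ring
  have h3 : (0 : Int) + (k : Int) = ((k : Nat) : Int) := by ring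
  have h4 : ((k : Nat) : Int) + 1 = ((k + 1 : Nat) : Int) := by push_cast; ring
  rw [h1, h2, h3, h4]
  simp only [PySem.List.pyGetD_natCast, List.getD_cons_succ]

lemma pvCountA (cs : List Char) :
    (PySem.List.pyRange 0 (PySem.List.len cs - 1) 1).foldl
      (fun c i => if PySem.List.pyGetD cs i ' ' ≠ PySem.List.pyGetD cs (i + 1) ' ' then c + 1 else c) 0
    = pvTrans cs := by
  induction cs with
  | nil => simp [PySem.List.pyRange_one_eq_nil, pvTrans]
  | cons a rest ih =>
    cases rest with
    | nil =>
      simp [PySem.List.len, PySem.List.pyRange_one_eq_nil, pvTrans]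
    | cons b rest' =>
      have hlen : PySem.List.len (a :: b :: rest') - 1 = ((rest'.length : Nat) : Int) + 1 := by
        simp only [PySem.List.len_eq, List.length_cons]; push_cast; ring
      rw [hlen]
      have h01 : (0 : Int) < ((rest'.length : Nat) : Int) + 1 := by positivity
      rw [PySem.List.pyRange_one_cons h01]
      simp only [List.foldl_cons, zero_add]
      have hget0 : PySem.List.pyGetD (a :: b :: rest') 0 ' ' = a := by
        simp [PySem.List.pyGetD_zero_cons]
      have hget1 : PySem.List.pyGetD (a :: b :: rest') 1 ' ' = b := by
        have hc : (1 : Int) = ((1 : Nat) : Int) := by norm_num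
        rw [hc, PySem.List.pyGetD_natCast]; rfl
      rw [hget0, hget1]
      rw [pvShift a (b :: rest') rest'.length (if a ≠ b then 1 else 0)]
      rw [PySem.List.foldl_ite_add_one]
      have hlen2 : ((rest'.length : Nat) : Int) = PySem.List.len (b :: rest') - 1 := by
        simp only [PySem.List.len_eq, List.length_cons]; push_cast; ring
      have ih' := ih
      rw [PySem.List.foldl_ite_add_one, hlen2.symm] at ih'
      rw [← hlen2] at *
      have hcount : ((PySem.List.pyRange 0 ((rest'.length : Nat) : Int) 1).countP
          (fun i => decide (PySem.List.pyGetD (b :: rest') i ' ' ≠ PySem.List.pyGetD (b :: rest') (i + 1) ' ')) : Int)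
          = pvTrans (b :: rest') := by
        rw [← ih']; ring
      rw [hcount]
      by_cases hab : a = b <;> simp [pvTrans, hab]

-- skipping a run removes exactly the leading equal block from the transition count
lemma pvTrans_skip (rest : List Char) : ∀ (c : Char),
    pvTrans (c :: rest) =
      (if pvSkipRun c rest = [] then 0 else 1) + pvTrans (pvSkipRun c rest) := by
  induction rest with
  | nil => intro c; simp [pvSkipRun, pvTrans]
  | cons b r ih =>
    intro c
    by_cases hbc : b = c
    · subst hbc
      have h1 : pvTrans (b :: b :: r) = pvTrans (b :: r) := by simp [pvTrans]
      simp only [pvSkipRun, h1]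
      exact ih b
    · have hne : c ≠ b := fun h => hbc h.symm
      simp [pvSkipRun, hbc, pvTrans, hne]

-- B's run count equals pvTrans + 1 on non-empty lists (strong induction on length)
lemma pvRuns_eq (cs : List Char) (h : cs ≠ []) : pvRuns cs = pvTrans cs + 1 := by
  induction hn : cs.length using Nat.strong_induction_on generalizing cs with
  | _ n ih =>
    cases cs with
    | nil => exact absurd rfl h
    | cons c rest =>
      rw [show pvRuns (c :: rest) = 1 + pvRuns (pvSkipRun c rest) from by rw [pvRuns], pvTrans_skip rest c]
      by_cases hs : pvSkipRun c rest = []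
      · simp [hs, pvRuns, pvTrans]
      · have hlt : (pvSkipRun c rest).length < n := by
          subst hn
          exact Nat.lt_succ_of_le (pvSkipRun_length_le c rest)
        have := ih _ hlt (pvSkipRun c rest) hs rfl
        rw [this, if_neg hs]
        ring

-- (t+2)//2 = t//2 + 1 for floor division
lemma pvFdiv_shift (t : Int) : PySem.Int.floordiv (t + 2) 2 = PySem.Int.floordiv t 2 + 1 := by
  rw [PySem.Int.floordiv_eq_ediv_of_pos (by omega), PySem.Int.floordiv_eq_ediv_of_pos (by omega)]
  omega

-- ===== VERDICT (by name: the statement is the Claim_ definition above) =====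
theorem chefAndGroups_spec : Claim_equal_chefAndGroups := by
  intro arr _ hpre
  unfold Spec_chefAndGroups chefAndGroups chefAndGroups_alt
  simp only [pvCountA arr.toList, pvRuns_eq arr.toList hpre]
  have : pvTrans arr.toList + 1 + 1 = pvTrans arr.toList + 2 := by ring
  rw [this, pvFdiv_shift]
  split <;> ring
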